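-- pv_equiv track=rewrite | github.com/acai-solutions/terraform-aws-acf-core-configuration | shared/complex_map_to_simple_map/python/flatten_map.py | needs_encoding
-- ===== SOURCE A (Python) =====
-- def needs_encoding(value):
--     """Check if a value needs URL encoding."""
--     if not isinstance(value, str):
--         return False
--
--     # Characters that cause issues in Parameter Store or are part of URLs
--     problematic_chars = [
--         " ",
--         "&",
--         "=",
--         "?",
--         "#",
--         "@",
--         "%",
--         "+",
--         '"',
--         "'",
--         "/",
--         ":",
--         ";",
--         "<",
--         ">",
--         "[",
--         "]",
--         "{",
--         "}",
--         "|",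
--         "\\",
--     ]
--     return any(char in value for char in problematic_chars)
-- ===== SOURCE B (Python) =====
-- _BAD = set(' &=?#@%+"\'/:;<>[]{}|\\')
--
--
-- def needs_encoding(value):
--     """Check if a value needs URL encoding."""
--     if not isinstance(value, str):
--         return False
--     return any(c in _BAD for c in value)
-- ===== Notes on version B (the rewrite author's own statement) =====
-- stated objective: idiomatic
-- what changed: B iterates once over the characters of the input string, testing each against a precomputed set of problematic characters, instead of A's loop over the fixed character list with a substring search of the whole input for each.
import Mathlib
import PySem

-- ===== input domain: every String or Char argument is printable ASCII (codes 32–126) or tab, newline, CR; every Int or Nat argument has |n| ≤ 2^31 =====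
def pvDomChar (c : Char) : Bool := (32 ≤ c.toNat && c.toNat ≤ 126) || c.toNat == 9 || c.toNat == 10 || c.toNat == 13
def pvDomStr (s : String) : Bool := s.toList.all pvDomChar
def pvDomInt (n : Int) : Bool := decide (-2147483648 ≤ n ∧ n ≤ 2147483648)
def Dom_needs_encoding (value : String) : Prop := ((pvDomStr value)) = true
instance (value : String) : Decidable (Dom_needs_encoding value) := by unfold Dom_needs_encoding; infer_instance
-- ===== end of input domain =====

-- B iterates once over the input's characters testing each against a set of the problematic
-- characters, instead of A's loop over the fixed list with a substring search per character (idiomatic).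

-- ===== PORT A =====
-- A's fixed list of problematic characters (Python list of one-character strings)
def pvProblematic : List String := [" ", "&", "=", "?", "#", "@", "%", "+", "\"", "'", "/", ":", ";", "<", ">", "[", "]", "{", "}", "|", "\\"]

-- A: any(char in value for char in problematic_chars)
def needs_encoding (value : String) : Bool :=
  pvProblematic.any (fun ch => PySem.Str.isIn ch value)

-- ===== PORT B =====
-- B's set of problematic characters, built once: set(' &=?#@%+"\'/:;<>[]{}|\\')
def pvBadSet : PySem.Set Char := PySem.Set.ofList [' ', '&', '=', '?', '#', '@', '%', '+', '"', '\'', '/', ':', ';', '<', '>', '[', ']', '{', '}', '|', '\\']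

-- B: any(c in _BAD for c in value)
def needs_encoding_alt (value : String) : Bool :=
  value.toList.any (fun c => PySem.Set.contains pvBadSet c)

-- ===== PRECONDITION & SPEC =====
def Spec_needs_encoding (value : String) (out : Bool) : Prop := out = needs_encoding_alt value
instance (value : String) (out : Bool) : Decidable (Spec_needs_encoding value out) := by unfold Spec_needs_encoding; infer_instance

-- ===== CLAIM (what is proved, stated in full; the proofs are below) =====
def Claim_equal_needs_encoding : Prop := ∀ (value : String), Dom_needs_encoding value → Spec_needs_encoding value (needs_encoding value)

-- ===== LEMMAS AND PROOFS =====

-- a one-character substring test is a character-membership test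
theorem isIn_single (c : Char) (cs : String) (h : cs.toList = [c]) (s : String) :
    PySem.Str.isIn cs s = s.toList.contains c := by
  rw [Bool.eq_iff_iff, PySem.Str.isIn_iff_infix, h, List.contains_iff_mem]
  constructor
  · intro hin; exact hin.subset (List.mem_singleton_self c)
  · intro hm
    obtain ⟨pre, suf, hps⟩ := List.append_of_mem hm
    rw [hps]; exact ⟨pre, suf, by simp⟩

-- "some element of l lies in m" does not depend on which list is traversed
theorem any_contains_comm (l m : List Char) :
    l.any (fun x => m.contains x) = m.any (fun x => l.contains x) := by
  rw [Bool.eq_iff_iff]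
  simp only [List.any_eq_true, List.contains_iff_mem]
  exact ⟨fun ⟨x, h1, h2⟩ => ⟨x, h2, h1⟩, fun ⟨x, h1, h2⟩ => ⟨x, h2, h1⟩⟩

theorem needs_encoding_eq (value : String) :
    needs_encoding value = needs_encoding_alt value := by
  have halt : needs_encoding_alt value
      = value.toList.any (fun c => ([' ', '&', '=', '?', '#', '@', '%', '+', '"', '\'', '/', ':', ';', '<', '>', '[', ']', '{', '}', '|', '\\'] : List Char).contains c) := by
    unfold needs_encoding_alt
    refine PySem.List.any_congr_mem (fun c _ => ?_)
    rw [Bool.eq_iff_iff, PySem.Set.contains_iff, List.contains_iff_mem, pvBadSet,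
      PySem.Set.mem_ofList]
  rw [halt, any_contains_comm]
  unfold needs_encoding pvProblematic
  simp only [List.any_cons, List.any_nil]
  rw [isIn_single ' ' " " rfl value, isIn_single '&' "&" rfl value, isIn_single '=' "=" rfl value, isIn_single '?' "?" rfl value, isIn_single '#' "#" rfl value, isIn_single '@' "@" rfl value, isIn_single '%' "%" rfl value, isIn_single '+' "+" rfl value, isIn_single '"' "\"" rfl value, isIn_single '\'' "'" rfl value, isIn_single '/' "/" rfl value, isIn_single ':' ":" rfl value, isIn_single ';' ";" rfl value, isIn_single '<' "<" rfl value, isIn_single '>' ">" rfl value, isIn_single '[' "[" rfl value, isIn_single ']' "]" rfl value, isIn_single '{' "{" rfl value, isIn_single '}' "}" rfl value, isIn_single '|' "|" rfl value, isIn_single '\\' "\\" rfl value]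

-- ===== VERDICT (by name: the statement is the Claim_ definition above) =====
theorem needs_encoding_spec : Claim_equal_needs_encoding := by
  intro value _
  unfold Spec_needs_encoding
  exact needs_encoding_eq value
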